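-- pv_equiv track=rewrite | github.com/Yuriy4774/Algotester-solutions | 2222.py | check
-- ===== SOURCE A (Python) =====
-- a = 'ABCDEFGHIJKLMNOPQRSTUVWXYZ'
--
-- def check(s):
--     surname,name = "",""
--     yes = False
--     for i in s:
--       if i in a:
--             yes = not yes
--       if yes:
--             surname+=i
--       else:
--             name+=i
--     ans = name+ surname
--     return ans
-- ===== SOURCE B (Python) =====
-- a = 'ABCDEFGHIJKLMNOPQRSTUVWXYZ'
--
-- def _segs(s):
--     # carve s (which starts at a toggle point) into slices, each beginning
--     # with an uppercase letter and running up to (excl.) the next one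
--     out = []
--     while s:
--         k = 1
--         while k < len(s) and s[k] not in a:
--             k += 1
--         out.append(s[:k])
--         s = s[k:]
--     return out
--
-- def check(s):
--     k = 0
--     while k < len(s) and s[k] not in a:
--         k += 1
--     head, segs = s[:k], _segs(s[k:])
--     name = head + ''.join(segs[1::2])
--     surname = ''.join(segs[0::2])
--     return name + surname
-- ===== Notes on version B (the rewrite author's own statement) =====
-- stated objective: alternative
-- what changed: B first carves the string into maximal segments starting at each uppercase toggle point and then joins the even/odd segments into surname/name, instead of A's per-character boolean-toggle accumulation.
import Mathlib
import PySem

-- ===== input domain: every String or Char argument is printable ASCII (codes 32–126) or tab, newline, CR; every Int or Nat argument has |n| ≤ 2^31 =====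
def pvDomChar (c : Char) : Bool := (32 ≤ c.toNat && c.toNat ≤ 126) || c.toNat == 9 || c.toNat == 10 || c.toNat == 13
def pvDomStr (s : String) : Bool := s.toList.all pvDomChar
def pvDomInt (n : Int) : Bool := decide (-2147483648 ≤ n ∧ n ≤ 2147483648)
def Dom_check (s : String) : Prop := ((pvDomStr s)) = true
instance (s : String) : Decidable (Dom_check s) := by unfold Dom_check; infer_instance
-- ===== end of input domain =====

-- B carves the string into segments at the uppercase toggle points and joins alternating segments,
-- instead of A's per-character flag toggle; objective: alternative decomposition (same cost).

-- the module constant a = 'ABCDEFGHIJKLMNOPQRSTUVWXYZ'; `i in a` is membership in it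
def pvUpList : List Char := "ABCDEFGHIJKLMNOPQRSTUVWXYZ".toList

-- ===== PORT A =====
-- loop body: toggle `yes` on uppercase, then append the char to surname (yes) or name (not yes)
def checkStep (st : List Char × List Char × Bool) (i : Char) : List Char × List Char × Bool :=
  let yes := if pvUpList.contains i then !st.2.2 else st.2.2
  if yes then (st.1 ++ [i], st.2.1, yes) else (st.1, st.2.1 ++ [i], yes)

def check (s : String) : String :=
  let r := s.toList.foldl checkStep ([], [], false)
  String.ofList (r.2.1 ++ r.1)

-- ===== PORT B =====
def pvNotUp (c : Char) : Bool := !(pvUpList.contains c)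

-- _segs: each segment starts with an uppercase letter and runs up to (excl.) the next one
def pvSegs : List Char → List (List Char)
  | [] => []
  | c :: t => (c :: t.takeWhile pvNotUp) :: pvSegs (t.dropWhile pvNotUp)
termination_by xs => xs.length
decreasing_by simpa using Nat.lt_succ_of_le (List.length_dropWhile_le pvNotUp t)

-- join of the even-indexed segments (fst = segs[0::2]) and odd-indexed segments (snd = segs[1::2])
def pvAltJoin : List (List Char) → List Char × List Char
  | [] => ([], [])
  | s :: ss => let r := pvAltJoin ss; (s ++ r.2, r.1)

def check_alt (s : String) : String :=
  let xs := s.toList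
  let head := xs.takeWhile pvNotUp       -- prefix before the first uppercase
  let j := pvAltJoin (pvSegs (xs.dropWhile pvNotUp))
  String.ofList ((head ++ j.2) ++ j.1)   -- name (head + segs[1::2]) ++ surname (segs[0::2])

-- ===== PRECONDITION & SPEC =====
def Spec_check (s : String) (out : String) : Prop := out = check_alt s
instance (s : String) (out : String) : Decidable (Spec_check s out) := by unfold Spec_check; infer_instance

-- ===== CLAIM (what is proved, stated in full; the proofs are below) =====
def Claim_equal_check : Prop := ∀ (s : String), Dom_check s → Spec_check s (check s)

-- ===== LEMMAS AND PROOFS =====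

-- front-recursive characterisation of A's fold: (surname, name, final flag) on xs starting with flag b
def pvG : List Char → Bool → List Char × List Char × Bool
  | [], b => ([], [], b)
  | c :: t, b =>
    let b' := if pvUpList.contains c then !b else b
    let r := pvG t b'
    if b' then (c :: r.1, r.2.1, r.2.2) else (r.1, c :: r.2.1, r.2.2)

theorem foldl_checkStep (xs : List Char) (S N : List Char) (b : Bool) :
    xs.foldl checkStep (S, N, b) =
      (S ++ (pvG xs b).1, N ++ (pvG xs b).2.1, (pvG xs b).2.2) := by
  induction xs generalizing S N b with
  | nil => simp [pvG]
  | cons c t ih =>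
    simp only [List.foldl_cons, checkStep, pvG]
    by_cases h : pvUpList.contains c = true <;>
      simp only [h, if_true, Bool.not_eq_true'] <;>
      cases b <;> simp [ih]

-- A's toggle split equals B's alternating-segment split, for either starting flag
theorem pvG_segs (xs : List Char) (b : Bool) :
    ((pvG xs b).1, (pvG xs b).2.1) =
      (let tw := xs.takeWhile pvNotUp
       let j := pvAltJoin (pvSegs (xs.dropWhile pvNotUp))
       if b then (tw ++ j.2, j.1) else (j.1, tw ++ j.2)) := by
  induction xs generalizing b with
  | nil => cases b <;> simp [pvG, pvSegs, pvAltJoin]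
  | cons c t ih =>
    by_cases h : pvUpList.contains c = true
    · have hnu : pvNotUp c = false := by simp [pvNotUp]; exact List.mem_of_elem_eq_true h
      have iht := ih (!b)
      rw [pvSegs.eq_def]
      simp only [pvG, h, if_true, List.takeWhile_cons, List.dropWhile_cons, hnu,
        Bool.false_eq_true, if_false, pvAltJoin] at *
      have e1 := congrArg Prod.fst iht
      have e2 := congrArg Prod.snd iht
      simp only [] at e1 e2
      cases b <;> simp_all
    · have hb : (if pvUpList.contains c then !b else b) = b := by rw [if_neg h]
      have hnu : pvNotUp c = true := by
        simp [pvNotUp]; intro hm; exact h (List.elem_eq_true_of_mem hm)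
      have iht := ih b
      simp only [pvG, hb, List.takeWhile_cons, List.dropWhile_cons, hnu, if_true] at *
      have e1 := congrArg Prod.fst iht
      have e2 := congrArg Prod.snd iht
      simp only [] at e1 e2
      cases b <;> simp_all

-- ===== VERDICT (by name: the statement is the Claim_ definition above) =====
theorem check_spec : Claim_equal_check := by
  intro s _
  unfold Spec_check check check_alt
  have h1 := foldl_checkStep s.toList [] [] false
  have h2 := pvG_segs s.toList false
  simp only [List.nil_append] at h1
  simp only [if_neg Bool.false_ne_true] at h2
  have e1 : (pvG s.toList false).1 = (pvAltJoin (pvSegs (s.toList.dropWhile pvNotUp))).1 :=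
    congrArg Prod.fst h2
  have e2 : (pvG s.toList false).2.1 =
      s.toList.takeWhile pvNotUp ++ (pvAltJoin (pvSegs (s.toList.dropWhile pvNotUp))).2 :=
    congrArg Prod.snd h2
  simp [h1, e1, e2]
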